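-- pv_equiv track=rewrite | github.com/zowelqqee/JARVIS | clarification/clarification_handler.py | _select_candidate
-- ===== SOURCE A (Python) =====
-- def _select_candidate(reply: str, candidates: list[str]) -> str | None:
--     if not candidates:
--         return None
--
--     if reply.isdigit():
--         index = int(reply) - 1
--         if 0 <= index < len(candidates):
--             return candidates[index]
--
--     lowered = reply.lower()
--     exact = [candidate for candidate in candidates if candidate.lower() == lowered]
--     if len(exact) == 1:
--         return exact[0]
--
--     prefix = [candidate for candidate in candidates if candidate.lower().startswith(lowered)]
--     if len(prefix) == 1:
--         return prefix[0]
--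
--     return None
-- ===== SOURCE B (Python) =====
-- def _unique_match(pred, candidates):
--     # early-exit search: find the first match; it is the answer iff no later match exists
--     for i, c in enumerate(candidates):
--         if pred(c):
--             return None if any(pred(d) for d in candidates[i + 1:]) else c
--     return None
--
--
-- def _select_candidate(reply: str, candidates: list[str]) -> str | None:
--     if not candidates:
--         return None
--
--     if reply.isdigit():
--         index = int(reply) - 1
--         if 0 <= index < len(candidates):
--             return candidates[index]
--
--     lowered = reply.lower()
--     winner = _unique_match(lambda c: c.lower() == lowered, candidates)
--     if winner is None:
--         winner = _unique_match(lambda c: c.lower().startswith(lowered), candidates)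
--     return winner
-- ===== Notes on version B (the rewrite author's own statement) =====
-- stated objective: alternative
-- what changed: A filters candidates into two intermediate lists and tests their lengths; B never builds a list: a generic early-exit unique_match search finds the first match and only then checks whether any later candidate also matches, short-circuiting on the second match.
import Mathlib
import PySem

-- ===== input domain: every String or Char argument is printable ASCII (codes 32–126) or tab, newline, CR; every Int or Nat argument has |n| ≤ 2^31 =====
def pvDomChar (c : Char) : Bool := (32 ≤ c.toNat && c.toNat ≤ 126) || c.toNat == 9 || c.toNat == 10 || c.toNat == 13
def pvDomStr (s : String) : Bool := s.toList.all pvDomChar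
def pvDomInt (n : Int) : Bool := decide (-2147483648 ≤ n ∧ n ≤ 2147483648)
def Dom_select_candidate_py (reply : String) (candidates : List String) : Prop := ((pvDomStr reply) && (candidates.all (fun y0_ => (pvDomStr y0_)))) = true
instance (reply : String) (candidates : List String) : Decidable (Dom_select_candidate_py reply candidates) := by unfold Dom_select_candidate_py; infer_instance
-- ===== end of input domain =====

-- B replaces A's two filter-and-count list comprehensions by a generic early-exit
-- unique-match search (first match, then check the tail for a second one); same result.

-- ===== PORT A =====
def select_candidate_py (reply : String) (candidates : List String) : Option String :=
  if candidates = [] then none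
  else
    let rest : Option String :=
      let lowered := PySem.Str.lower reply
      let exact := candidates.filter (fun c => PySem.Str.lower c == lowered)
      if exact.length = 1 then PySem.List.pyGet? exact 0
      else
        let pre := candidates.filter (fun c => PySem.Str.startswith (PySem.Str.lower c) lowered)
        if pre.length = 1 then PySem.List.pyGet? pre 0
        else none
    if PySem.Str.strIsdigit reply then
      -- isdigit guarantees int(reply) parses; getD 0 is never taken
      let index := (PySem.Int.ofStr? reply).getD 0 - 1
      if 0 ≤ index ∧ index < (candidates.length : Int) then PySem.List.pyGet? candidates index
      else rest
    else rest

-- ===== PORT B =====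
-- early-exit search: first match, then 'any' over the remaining tail
def uniqueMatch (pred : String → Bool) : List String → Option String
  | [] => none
  | c :: rest => if pred c then (if rest.any pred then none else some c)
                 else uniqueMatch pred rest

def select_candidate_py_alt (reply : String) (candidates : List String) : Option String :=
  if candidates = [] then none
  else
    let rest : Option String :=
      let lowered := PySem.Str.lower reply
      match uniqueMatch (fun c => PySem.Str.lower c == lowered) candidates with
      | some w => some w
      | none => uniqueMatch (fun c => PySem.Str.startswith (PySem.Str.lower c) lowered) candidates
    if PySem.Str.strIsdigit reply then
      -- isdigit guarantees int(reply) parses; getD 0 is never taken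
      let index := (PySem.Int.ofStr? reply).getD 0 - 1
      if 0 ≤ index ∧ index < (candidates.length : Int) then PySem.List.pyGet? candidates index
      else rest
    else rest

-- ===== PRECONDITION & SPEC =====
def Spec_select_candidate_py (reply : String) (candidates : List String) (out : Option String) : Prop := out = select_candidate_py_alt reply candidates
instance (reply : String) (candidates : List String) (out : Option String) : Decidable (Spec_select_candidate_py reply candidates out) := by unfold Spec_select_candidate_py; infer_instance

-- ===== CLAIM (what is proved, stated in full; the proofs are below) =====
def Claim_equal_select_candidate_py : Prop := ∀ (reply : String) (candidates : List String), Dom_select_candidate_py reply candidates → Spec_select_candidate_py reply candidates (select_candidate_py reply candidates)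

-- ===== LEMMAS AND PROOFS =====

-- the early-exit search returns exactly the sole element of the filter, when it is sole
theorem uniqueMatch_eq_filter (pred : String → Bool) (l : List String) :
    uniqueMatch pred l =
      if (l.filter pred).length = 1 then (l.filter pred).head? else none := by
  induction l with
  | nil => simp [uniqueMatch]
  | cons c rest ih =>
    simp only [uniqueMatch, List.filter_cons]
    by_cases hc : pred c = true
    · simp only [hc, if_true]
      by_cases ha : rest.any pred = true
      · have : rest.filter pred ≠ [] := by
          rcases List.any_eq_true.mp ha with ⟨x, hx, hpx⟩
          exact List.ne_nil_of_mem (List.mem_filter.mpr ⟨hx, hpx⟩)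
        have hlen : (rest.filter pred).length ≠ 0 := by
          simpa [List.length_eq_zero_iff] using this
        simp only [ha, if_true, List.length_cons]
        rw [if_neg (by omega)]
      · have : rest.filter pred = [] := by
          simpa [List.filter_eq_nil_iff] using (by simpa using ha : ¬ rest.any pred = true)
        simp [ha, this]
    · simp [hc, ih]

theorem head?_eq_pyGet?_zero (l : List String) : PySem.List.pyGet? l 0 = l.head? := by
  cases l <;> simp [PySem.List.pyGet?, PySem.List.pyIdx?]

-- ===== VERDICT (by name: the statement is the Claim_ definition above) =====
theorem select_candidate_py_spec : Claim_equal_select_candidate_py := by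
  intro reply candidates _
  unfold Spec_select_candidate_py select_candidate_py select_candidate_py_alt
  simp only [uniqueMatch_eq_filter, head?_eq_pyGet?_zero]
  by_cases h1 : (candidates.filter (fun c => PySem.Str.lower c == PySem.Str.lower reply)).length = 1
  · rcases hx : candidates.filter (fun c => PySem.Str.lower c == PySem.Str.lower reply) with _ | ⟨a, t⟩
    · simp [hx] at h1
    · have ht : t = [] := by
        have := h1; rw [hx] at this; simpa using this
      simp [ht]
  · simp [h1]
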